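-- pv_equiv track=rewrite | github.com/djphamill/katas | codility/lessons/07/stonewall/solution.py | cut_out_foundation_brick
-- ===== SOURCE A (Python) =====
-- from typing import List
--
-- def cut_out_foundation_brick(heights: List[int]) -> List[List[int]]:
--     minimum_height = min(heights)
--     group_of_new_heights = []
--     new_heights = []
--     for height in heights:
--         if height != minimum_height:
--             new_heights.append(height)
--         else:
--             if new_heights:
--                 group_of_new_heights.append(new_heights)
--             new_heights = []
--     if new_heights:
--         group_of_new_heights.append(new_heights)
--     return group_of_new_heights
-- ===== SOURCE B (Python) =====
-- from typing import List
--
-- def cut_out_foundation_brick(heights: List[int]) -> List[List[int]]: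
--     # Two-pointer run extraction: skip minima, slice out each maximal non-min run.
--     m = min(heights)
--     groups = []
--     i, n = 0, len(heights)
--     while i < n:
--         if heights[i] == m:
--             i += 1
--         else:
--             j = i
--             while j < n and heights[j] != m:
--                 j += 1
--             groups.append(heights[i:j])
--             i = j
--     return groups
-- ===== Notes on version B (the rewrite author's own statement) =====
-- stated objective: alternative
-- what changed: Replaces the accumulator-plus-flush for-loop with two-pointer run extraction: skip minimum positions and slice out each maximal run of non-minimum heights directly.
import Mathlib
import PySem

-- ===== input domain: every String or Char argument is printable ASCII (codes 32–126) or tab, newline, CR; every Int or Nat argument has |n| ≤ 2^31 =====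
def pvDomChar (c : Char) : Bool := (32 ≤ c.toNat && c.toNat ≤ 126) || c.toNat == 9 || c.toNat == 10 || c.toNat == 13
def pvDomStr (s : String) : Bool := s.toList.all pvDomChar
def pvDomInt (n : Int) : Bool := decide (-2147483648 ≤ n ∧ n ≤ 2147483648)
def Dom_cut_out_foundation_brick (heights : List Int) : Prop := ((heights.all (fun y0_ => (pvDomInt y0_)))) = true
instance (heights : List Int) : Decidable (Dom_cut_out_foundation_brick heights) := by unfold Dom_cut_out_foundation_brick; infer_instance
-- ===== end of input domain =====

-- B replaces A's accumulator-plus-flush loop with two-pointer extraction of maximal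
-- non-minimum runs (objective: alternative decomposition, same cost).


-- ===== PORT A =====
-- one step of A's for-loop: state = (group_of_new_heights, new_heights)
def brickStep (m : Int) (st : List (List Int) × List Int) (h : Int) : List (List Int) × List Int :=
  if h ≠ m then (st.1, st.2 ++ [h])
  else (if st.2.isEmpty then st.1 else st.1 ++ [st.2], [])

def cut_out_foundation_brick (heights : List Int) : List (List Int) :=
  match PySem.List.min? heights (fun x => x) with
  | none => []   -- Python 'min' raises ValueError here; excluded by Pre_
  | some m =>
    let st := heights.foldl (brickStep m) ([], [])
    if st.2.isEmpty then st.1 else st.1 ++ [st.2]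

-- ===== PORT B =====
-- inner while loop of B: extract the maximal run of non-minimum heights, then recurse
def brickRuns (m : Int) : List Int → List (List Int)
  | [] => []
  | h :: t =>
    if h = m then brickRuns m t
    else (h :: t.takeWhile (fun x => x ≠ m)) :: brickRuns m (t.dropWhile (fun x => x ≠ m))
termination_by l => l.length
decreasing_by
  · simp
  · have := List.length_dropWhile_le (fun x => decide (x ≠ m)) t
    simp at *; omega

def cut_out_foundation_brick_alt (heights : List Int) : List (List Int) :=
  match PySem.List.min? heights (fun x => x) with
  | none => []   -- Python 'min' raises ValueError here; excluded by Pre_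
  | some m => brickRuns m heights

-- ===== PRECONDITION & SPEC =====
-- A (and B) raise ValueError via min() on the empty list; Pre_ excludes exactly that input.
def Pre_cut_out_foundation_brick (heights : List Int) : Prop := heights ≠ []
instance (heights : List Int) : Decidable (Pre_cut_out_foundation_brick heights) := by unfold Pre_cut_out_foundation_brick; infer_instance
def pvWitness_cut_out_foundation_brick : List Int := ([3, 1, 2])

def Spec_cut_out_foundation_brick (heights : List Int) (out : List (List Int)) : Prop := out = cut_out_foundation_brick_alt heights
instance (heights : List Int) (out : List (List Int)) : Decidable (Spec_cut_out_foundation_brick heights out) := by unfold Spec_cut_out_foundation_brick; infer_instance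

-- ===== CLAIM (what is proved, stated in full; the proofs are below) =====
def Claim_equal_cut_out_foundation_brick : Prop := ∀ (heights : List Int), Dom_cut_out_foundation_brick heights → Pre_cut_out_foundation_brick heights → Spec_cut_out_foundation_brick heights (cut_out_foundation_brick heights)

-- ===== LEMMAS AND PROOFS =====

-- A's loop followed by the final flush, as one function of (groups, current run, remaining input)
def runA (m : Int) (gs : List (List Int)) (cur : List Int) (l : List Int) : List (List Int) :=
  let st := l.foldl (brickStep m) (gs, cur)
  if st.2.isEmpty then st.1 else st.1 ++ [st.2]

lemma runA_nil (m : Int) (gs : List (List Int)) (cur : List Int) :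
    runA m gs cur [] = if cur.isEmpty then gs else gs ++ [cur] := by
  simp [runA]

lemma runA_cons (m : Int) (gs : List (List Int)) (cur : List Int) (h : Int) (t : List Int) :
    runA m gs cur (h :: t) =
      if h = m then runA m (if cur.isEmpty then gs else gs ++ [cur]) [] t
      else runA m gs (cur ++ [h]) t := by
  by_cases hh : h = m <;> simp [runA, brickStep, hh]

lemma runA_prefix (m : Int) (g1 g2 : List (List Int)) (cur : List Int) (l : List Int) :
    runA m (g1 ++ g2) cur l = g1 ++ runA m g2 cur l := by
  induction l generalizing g2 cur with
  | nil => by_cases hc : cur.isEmpty <;> simp [runA_nil, hc]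
  | cons h t ih =>
    by_cases hh : h = m
    · rw [runA_cons, runA_cons, if_pos hh, if_pos hh]
      by_cases hc : cur.isEmpty
      · simp [hc, ih]
      · simp only [hc, Bool.false_eq_true, ite_false, List.append_assoc, ih]
    · rw [runA_cons, runA_cons, if_neg hh, if_neg hh, ih]

-- consuming a block of non-minimum heights just extends the current run
lemma runA_nonmin (m : Int) (run : List Int) (hrun : ∀ x ∈ run, x ≠ m) :
    ∀ gs cur rest, runA m gs cur (run ++ rest) = runA m gs (cur ++ run) rest := by
  induction run with
  | nil => intro gs cur rest; simp
  | cons h t ih =>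
    intro gs cur rest
    have hh : h ≠ m := hrun h (by simp)
    have ht : ∀ x ∈ t, x ≠ m := fun x hx => hrun x (by simp [hx])
    rw [List.cons_append, runA_cons, if_neg hh, ih ht]
    simp

-- the main equivalence, by strong induction on length
lemma runA_eq_brickRuns (m : Int) : ∀ n (l : List Int), l.length ≤ n →
    runA m [] [] l = brickRuns m l := by
  intro n
  induction n with
  | zero =>
    intro l hl
    have : l = [] := List.eq_nil_of_length_eq_zero (Nat.le_zero.mp hl)
    simp [this, runA_nil, brickRuns]
  | succ n ih =>
    intro l hl
    match l with
    | [] => simp [runA_nil, brickRuns]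
    | h :: t =>
      by_cases hh : h = m
      · rw [runA_cons, if_pos hh, brickRuns, if_pos hh]
        simp only [List.isEmpty_nil, ite_true]
        exact ih t (by simpa using Nat.lt_succ_iff.mp (Nat.lt_of_lt_of_le (by simp) hl))
      · rw [brickRuns, if_neg hh]
        set run := t.takeWhile (fun x => x ≠ m) with hrdef
        set rest := t.dropWhile (fun x => x ≠ m) with hsdef
        have hsplit : t = run ++ rest := (List.takeWhile_append_dropWhile).symm
        have hrun : ∀ x ∈ run, x ≠ m := by
          intro x hx
          have := List.mem_takeWhile_imp hx
          simpa using this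
        have hlen : rest.length ≤ n := by
          have h1 : rest.length ≤ t.length := List.length_dropWhile_le _ t
          have h2 : t.length ≤ n := by simpa using Nat.lt_succ_iff.mp (Nat.lt_of_lt_of_le (by simp) hl)
          omega
        rw [runA_cons, if_neg hh, hsplit, runA_nonmin m run hrun]
        simp only [List.nil_append, List.singleton_append]
        -- rest is [] or starts with m
        match hrest : rest with
        | [] =>
          simp [runA_nil, brickRuns]
        | r :: rest' =>
          have hr : r = m := by
            have h0 := List.head?_dropWhile_not (fun x => decide (x ≠ m)) t
            rw [← hsdef] at h0
            simpa using h0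
          rw [runA_cons, if_pos hr]
          simp only [List.isEmpty_cons, Bool.false_eq_true, ite_false, List.nil_append]
          have hpref := runA_prefix m [h :: run] [] [] rest'
          rw [List.append_nil] at hpref
          have hlen' : rest'.length ≤ n := by
            simp at hlen; omega
          rw [hpref, ih rest' hlen',
            show brickRuns m (r :: rest') = brickRuns m rest' from by rw [brickRuns, if_pos hr]]
          simp

-- ===== VERDICT (by name: the statement is the Claim_ definition above) =====
theorem cut_out_foundation_brick_spec : Claim_equal_cut_out_foundation_brick := by
  intro heights _ hpre
  unfold Spec_cut_out_foundation_brick cut_out_foundation_brick cut_out_foundation_brick_alt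
  match hmin : PySem.List.min? heights (fun x => x) with
  | none => rfl
  | some m =>
    show runA m [] [] heights = brickRuns m heights
    exact runA_eq_brickRuns m heights.length heights le_rfl
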